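-- pv_equiv track=rewrite | github.com/LucaSforza/algoritmi2 | algo2/batteria5/stringhe_ternarie.py | stringhe_ternarie
-- ===== SOURCE A (Python) =====
-- def stringhe_ternarie(n: int) -> int:
--     T = [[1,1,1] for _ in range(n+1)]
--     for i in range(2,n+1):
--         for j in range(3):
--             if j == 1:
--                 T[i][j] = sum(T[i-1])
--             else:
--                 T[i][j] = T[i-1][1] + T[i-1][j]
--     return sum(T[n])
-- ===== SOURCE B (Python) =====
-- def stringhe_ternarie(n: int) -> int:
--     # Answer satisfies s_k = 2*s_{k-1} + s_{k-2} with s_0 = 1, s_1 = 3;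
--     # computed by fast 2x2 matrix exponentiation in O(log n).
--     if n == 0:
--         return 3
--     def mul(X, Y):
--         a, b, c, d = X
--         e, f, g, h = Y
--         return (a * e + b * g, a * f + b * h, c * e + d * g, c * f + d * h)
--     M = (2, 1, 1, 0)
--     R = (1, 0, 0, 1)
--     e = n - 1
--     while e > 0:
--         if e & 1:
--             R = mul(R, M)
--         M = mul(M, M)
--         e >>= 1
--     # (s_n, s_{n-1}) = R @ (s_1, s_0)
--     return 3 * R[0] + R[1]
-- ===== Notes on version B (the rewrite author's own statement) =====
-- stated objective: faster
-- what changed: Replaced the O(n) dynamic-programming table of 3-element rows by fast exponentiation of the 2x2 transition matrix of the linear recurrence s_k = 2*s_{k-1} + s_{k-2} that the row sums satisfy.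
import Mathlib
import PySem

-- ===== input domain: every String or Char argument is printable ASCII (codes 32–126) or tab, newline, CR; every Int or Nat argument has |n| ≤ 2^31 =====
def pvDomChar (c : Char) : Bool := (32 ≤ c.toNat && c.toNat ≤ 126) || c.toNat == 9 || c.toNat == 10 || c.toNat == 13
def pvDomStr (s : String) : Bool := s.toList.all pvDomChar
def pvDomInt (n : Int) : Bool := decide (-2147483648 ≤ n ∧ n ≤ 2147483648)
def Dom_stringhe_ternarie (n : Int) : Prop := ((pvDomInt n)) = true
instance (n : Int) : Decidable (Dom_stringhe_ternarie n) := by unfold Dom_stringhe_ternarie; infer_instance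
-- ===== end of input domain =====

-- B replaces A's O(n) row-by-row DP table by O(log n) fast exponentiation of the
-- 2x2 transition matrix of the linear recurrence satisfied by the row sums.

-- ===== PORT A =====
-- literal transliteration of A: build table T, update rows 2..n in place, sum T[n]
def stringhe_ternarie (n : Int) : Int :=
  let T : List (List Int) := (PySem.List.pyRange 0 (n+1) 1).map (fun _ => ([1,1,1] : List Int))
  let T := (PySem.List.pyRange 2 (n+1) 1).foldl (fun T i =>
    (PySem.List.pyRange 0 3 1).foldl (fun T j =>
      let v : Int :=
        if j == 1 then (PySem.List.pyGetD T (i-1) []).sum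
        else PySem.List.pyGetD (PySem.List.pyGetD T (i-1) []) 1 0
             + PySem.List.pyGetD (PySem.List.pyGetD T (i-1) []) j 0
      PySem.List.pySetD T i (PySem.List.pySetD (PySem.List.pyGetD T i []) j v)) T) T
  (PySem.List.pyGetD T n []).sum

-- ===== PORT B =====
-- 2x2 integer matrix as (a, b, c, d) = [[a,b],[c,d]]
def pvMul2 (X Y : Int × Int × Int × Int) : Int × Int × Int × Int :=
  (X.1 * Y.1 + X.2.1 * Y.2.2.1, X.1 * Y.2.1 + X.2.1 * Y.2.2.2,
   X.2.2.1 * Y.1 + X.2.2.2 * Y.2.2.1, X.2.2.1 * Y.2.1 + X.2.2.2 * Y.2.2.2)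

-- the while-loop of Source B: binary exponentiation (e>>=1 becomes /2 on the Nat exponent)
def pvPowLoop : Nat → (Int × Int × Int × Int) → (Int × Int × Int × Int) → (Int × Int × Int × Int)
  | 0, _, R => R
  | e+1, M, R =>
    let R' := if (e+1) % 2 = 1 then pvMul2 R M else R
    pvPowLoop ((e+1)/2) (pvMul2 M M) R'
  decreasing_by omega

def stringhe_ternarie_alt (n : Int) : Int :=
  if n == 0 then 3
  else
    let R := pvPowLoop (n-1).toNat (2,1,1,0) (1,0,0,1)
    3 * R.1 + R.2.1

-- ===== PRECONDITION & SPEC =====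
-- A raises IndexError (T[n] on the empty/short table) exactly when n < 0
def Pre_stringhe_ternarie (n : Int) : Prop := 0 ≤ n
instance (n : Int) : Decidable (Pre_stringhe_ternarie n) := by unfold Pre_stringhe_ternarie; infer_instance
def pvWitness_stringhe_ternarie : Int := (5)
def Spec_stringhe_ternarie (n : Int) (out : Int) : Prop := out = stringhe_ternarie_alt n
instance (n : Int) (out : Int) : Decidable (Spec_stringhe_ternarie n out) := by unfold Spec_stringhe_ternarie; infer_instance

-- ===== CLAIM (what is proved, stated in full; the proofs are below) =====
def Claim_equal_stringhe_ternarie : Prop := ∀ (n : Int), Dom_stringhe_ternarie n → Pre_stringhe_ternarie n → Spec_stringhe_ternarie n (stringhe_ternarie n)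

-- ===== LEMMAS AND PROOFS =====

-- the Pell-like companion sequence: u 0 = 0, u 1 = 1, u (k+2) = 2 u(k+1) + u k
def pvU : Nat → Int
  | 0 => 0
  | 1 => 1
  | k+2 => 2 * pvU (k+1) + pvU k

-- iterated-product power of a 2x2 matrix
def pvMPow (M : Int × Int × Int × Int) : Nat → Int × Int × Int × Int
  | 0 => (1,0,0,1)
  | k+1 => pvMul2 (pvMPow M k) M

lemma pvMul2_assoc (X Y Z : Int × Int × Int × Int) :
    pvMul2 (pvMul2 X Y) Z = pvMul2 X (pvMul2 Y Z) := by
  obtain ⟨a,b,c,d⟩ := X; obtain ⟨e,f,g,h⟩ := Y; obtain ⟨i,j,k,l⟩ := Z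
  simp only [pvMul2, Prod.mk.injEq]
  refine ⟨by ring, by ring, by ring, by ring⟩

lemma pvMul2_one (X : Int × Int × Int × Int) : pvMul2 X (1,0,0,1) = X := by
  obtain ⟨a,b,c,d⟩ := X; simp [pvMul2]

lemma pvOne_mul2 (X : Int × Int × Int × Int) : pvMul2 (1,0,0,1) X = X := by
  obtain ⟨a,b,c,d⟩ := X; simp [pvMul2]

lemma pvMPow_succ_comm (M : Int × Int × Int × Int) (k : Nat) :
    pvMPow M (k+1) = pvMul2 M (pvMPow M k) := by
  induction k with
  | zero => simp [pvMPow, pvMul2_one, pvOne_mul2]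
  | succ k ih =>
      calc pvMPow M (k+2) = pvMul2 (pvMPow M (k+1)) M := rfl
        _ = pvMul2 (pvMul2 M (pvMPow M k)) M := by rw [ih]
        _ = pvMul2 M (pvMPow M (k+1)) := by rw [pvMul2_assoc]; rfl

lemma pvMPow_sq (M : Int × Int × Int × Int) (k : Nat) :
    pvMPow (pvMul2 M M) k = pvMPow M (2*k) := by
  induction k with
  | zero => rfl
  | succ k ih =>
      have h2 : 2*(k+1) = (2*k+1)+1 := by ring
      calc pvMPow (pvMul2 M M) (k+1) = pvMul2 (pvMPow (pvMul2 M M) k) (pvMul2 M M) := rfl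
        _ = pvMul2 (pvMPow M (2*k)) (pvMul2 M M) := by rw [ih]
        _ = pvMul2 (pvMul2 (pvMPow M (2*k)) M) M := by rw [pvMul2_assoc]
        _ = pvMPow M (2*(k+1)) := by rw [h2]; rfl

lemma pvPowLoop_correct : ∀ e M R, pvPowLoop e M R = pvMul2 R (pvMPow M e) := by
  intro e
  induction e using Nat.strong_induction_on with
  | _ e ih =>
    match e with
    | 0 => intro M R; simp [pvPowLoop, pvMPow, pvMul2_one]
    | e+1 =>
      intro M R
      have hlt : (e+1)/2 < e+1 := by omega
      by_cases h : (e+1) % 2 = 1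
      · have he : 2*((e+1)/2) = e := by omega
        calc pvPowLoop (e+1) M R = pvPowLoop ((e+1)/2) (pvMul2 M M) (pvMul2 R M) := by
              simp [pvPowLoop, h]
          _ = pvMul2 (pvMul2 R M) (pvMPow (pvMul2 M M) ((e+1)/2)) := ih _ hlt _ _
          _ = pvMul2 (pvMul2 R M) (pvMPow M e) := by rw [pvMPow_sq, he]
          _ = pvMul2 R (pvMul2 M (pvMPow M e)) := by rw [pvMul2_assoc]
          _ = pvMul2 R (pvMPow M (e+1)) := by rw [← pvMPow_succ_comm]
      · have he : 2*((e+1)/2) = e+1 := by omega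
        calc pvPowLoop (e+1) M R = pvPowLoop ((e+1)/2) (pvMul2 M M) R := by
              simp [pvPowLoop, h]
          _ = pvMul2 R (pvMPow (pvMul2 M M) ((e+1)/2)) := ih _ hlt _ _
          _ = pvMul2 R (pvMPow M (e+1)) := by rw [pvMPow_sq, he]

lemma pvMPow_P (k : Nat) :
    pvMPow (2,1,1,0) k = (pvU (k+1), pvU k, pvU k, pvU (k+1) - 2 * pvU k) := by
  induction k with
  | zero => simp [pvMPow, pvU]
  | succ k ih =>
      show pvMul2 (pvMPow (2,1,1,0) k) (2,1,1,0) = _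
      rw [ih]
      simp only [pvMul2, Prod.mk.injEq]
      refine ⟨?_, ?_, ?_, ?_⟩ <;> simp [pvU] <;> ring

-- B's value for n = N ≥ 1
lemma alt_val (N : Nat) (h : 1 ≤ N) :
    stringhe_ternarie_alt (N : Int) = 3 * pvU N + pvU (N-1) := by
  have hne : ((N : Int) == 0) = false := by simp; omega
  have ht : ((N : Int) - 1).toNat = N - 1 := by omega
  have hs : N - 1 + 1 = N := by omega
  simp only [stringhe_ternarie_alt, hne, ht]
  rw [pvPowLoop_correct, pvOne_mul2, pvMPow_P, hs]
  simp

-- Python row i (i ≥ 1) of the table is rowR (i-1)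
def rowR (k : Nat) : List Int := [pvU (k+1), pvU (k+1) + pvU k, pvU (k+1)]

-- Python row k for any k ≥ 0
def rowR' (k : Nat) : List Int := match k with
  | 0 => [1,1,1]
  | k+1 => rowR k

lemma rowR'_zero : rowR' 0 = [1,1,1] := rfl
lemma rowR'_one : rowR' 1 = [1,1,1] := by simp [rowR', rowR, pvU]

-- the body of A's inner j-loop, and the whole inner loop, as named functions (defeq to the port's lambdas)
def pvF (T : List (List Int)) (i j : Int) : List (List Int) :=
  let v : Int :=
    if j == 1 then (PySem.List.pyGetD T (i-1) []).sum
    else PySem.List.pyGetD (PySem.List.pyGetD T (i-1) []) 1 0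
         + PySem.List.pyGetD (PySem.List.pyGetD T (i-1) []) j 0
  PySem.List.pySetD T i (PySem.List.pySetD (PySem.List.pyGetD T i []) j v)

def innerStep (T : List (List Int)) (i : Int) : List (List Int) :=
  (PySem.List.pyRange 0 3 1).foldl (fun T j => pvF T i j) T

lemma pyRange03 : PySem.List.pyRange 0 3 1 = [0,1,2] := by decide

lemma getD_append_left {α : Type} (A B : List α) (k : Nat) (hk : k < A.length) (d : α) :
    (A ++ B).getD k d = A.getD k d := by
  simp [List.getD, List.getElem?_append_left hk]

lemma getD_append_right_self {α : Type} (A : List α) (b : α) (B : List α) (d : α) :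
    (A ++ b :: B).getD A.length d = b := by
  simp [List.getD]

lemma set_append_len {α : Type} (A : List α) (b c : α) (B : List α) :
    (A ++ b :: B).set A.length c = A ++ c :: B := by
  simp

-- one application of the j-loop body on a well-formed table
lemma pvF_step (m : Nat) (A B : List (List Int)) (row prev : List Int)
    (hA : A.length = m + 1) (hprev : A.getD m [] = prev) (j : Int) :
    pvF (A ++ row :: B) ((m : Int) + 1) j =
      A ++ (PySem.List.pySetD row j
        (if j == 1 then prev.sum
         else PySem.List.pyGetD prev 1 0 + PySem.List.pyGetD prev j 0)) :: B := by
  have h2 : ((m : Int) + 1) = (((m+1 : Nat)) : Int) := by push_cast; ring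
  have hm : m < A.length := by omega
  unfold pvF
  rw [h2]
  simp only [show (((m+1 : Nat)) : Int) - 1 = ((m : Nat) : Int) from by push_cast; ring,
             PySem.List.pyGetD_natCast, PySem.List.pySetD_natCast]
  simp only [getD_append_left A (row :: B) m hm, hprev]
  simp only [show m + 1 = A.length from hA.symm, getD_append_right_self, set_append_len]

-- one full inner loop on a well-formed table
lemma innerStep_eq (m : Nat) (A B : List (List Int)) (a b c : Int)
    (hA : A.length = m + 1) (hprev : A.getD m [] = [a, b, c]) :
    innerStep (A ++ [1,1,1] :: B) ((m : Int) + 1) =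
      A ++ [b + a, a + b + c, b + c] :: B := by
  unfold innerStep
  rw [pyRange03]
  simp only [List.foldl_cons, List.foldl_nil]
  rw [pvF_step m A B _ _ hA hprev 0, pvF_step m A B _ _ hA hprev 1,
      pvF_step m A B _ _ hA hprev 2]
  have : (PySem.List.pySetD
      (PySem.List.pySetD
        (PySem.List.pySetD ([1,1,1] : List Int) 0
          (if (0 : Int) == 1 then [a,b,c].sum
           else PySem.List.pyGetD [a,b,c] 1 0 + PySem.List.pyGetD [a,b,c] (0:Int) 0)) 1
        (if (1 : Int) == 1 then [a,b,c].sum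
         else PySem.List.pyGetD [a,b,c] 1 0 + PySem.List.pyGetD [a,b,c] (1:Int) 0)) 2
      (if (2 : Int) == 1 then [a,b,c].sum
       else PySem.List.pyGetD [a,b,c] 1 0 + PySem.List.pyGetD [a,b,c] (2:Int) 0))
      = ([b + a, a + b + c, b + c] : List Int) := by
    simp [PySem.List.pySetD, PySem.List.pySet?, PySem.List.pyIdx?, PySem.List.pyGetD]
    ring
  rw [this]

-- the main table lemma: state of T after the outer loop up to i = m
lemma table_lem (N : Nat) : ∀ (m : Nat), m ≤ N →
    (PySem.List.pyRange 2 ((m : Int) + 1) 1).foldl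
      (fun T i => (PySem.List.pyRange 0 3 1).foldl (fun T j => pvF T i j) T)
      (List.replicate (N+1) ([1,1,1] : List Int))
    = (List.range (m+1)).map rowR' ++ List.replicate (N - m) ([1,1,1] : List Int) := by
  intro m
  induction m with
  | zero =>
      intro _
      rw [show ((0 : Nat) : Int) + 1 = (1 : Int) from by norm_num,
          PySem.List.pyRange_one_eq_nil (by norm_num : (1:Int) ≤ 2)]
      simp [List.replicate_succ, rowR'_zero]
  | succ m ih =>
      intro hm
      have hm' : m ≤ N := by omega
      by_cases h0 : m = 0
      · subst h0
        rw [show (((0:Nat) + 1 : Nat) : Int) + 1 = (2 : Int) from by norm_num,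
            PySem.List.pyRange_one_eq_nil (by norm_num : (2:Int) ≤ 2)]
        have hN1 : N + 1 = 2 + (N - 1) := by omega
        simp only [List.foldl_nil]
        rw [hN1, List.replicate_add]
        simp [List.range_succ, rowR'_zero, rowR'_one]
      · have hsplit : PySem.List.pyRange 2 ((((m+1) : Nat) : Int) + 1) 1
            = PySem.List.pyRange 2 ((m : Int) + 1) 1 ++ [(m : Int) + 1] := by
          rw [show ((((m+1) : Nat)) : Int) + 1 = ((m : Int) + 1) + 1 from by push_cast; ring]
          exact PySem.List.pyRange_one_succ_right (by omega)
        rw [hsplit, List.foldl_append, ih hm']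
        simp only [List.foldl_cons, List.foldl_nil]
        obtain ⟨k, hk⟩ : ∃ k, m = k + 1 := ⟨m - 1, by omega⟩
        have hAlen : ((List.range (m+1)).map rowR').length = m + 1 := by simp
        have hprev' : ((List.range (m+1)).map rowR').getD m []
            = [pvU (k+1), pvU (k+1) + pvU k, pvU (k+1)] := by
          have : ((List.range (m+1)).map rowR').getD m [] = rowR' m := by
            simp [List.getD]
          rw [this, hk]; rfl
        have hrep : N - m = (N - (m+1)) + 1 := by omega
        rw [hrep, List.replicate_succ]
        have step := innerStep_eq m ((List.range (m+1)).map rowR')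
            (List.replicate (N - (m+1)) ([1,1,1] : List Int))
            (pvU (k+1)) (pvU (k+1) + pvU k) (pvU (k+1)) hAlen hprev'
        unfold innerStep at step
        rw [pyRange03] at step
        rw [pyRange03, step]
        have hrow : ([(pvU (k+1) + pvU k) + pvU (k+1),
            pvU (k+1) + (pvU (k+1) + pvU k) + pvU (k+1),
            (pvU (k+1) + pvU k) + pvU (k+1)] : List Int) = rowR' (m+1) := by
          rw [hk]
          show _ = rowR (k+1)
          simp only [rowR, pvU, List.cons.injEq, and_true]
          refine ⟨by ring, by ring, by ring⟩
        simp [hrow, List.range_succ]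

-- A's value for n = N, in closed form
lemma a_val (N : Nat) : stringhe_ternarie (N : Int)
    = (((List.range (N+1)).map rowR').getD N []).sum := by
  have hinit : (PySem.List.pyRange 0 ((N : Int)+1) 1).map (fun _ => ([1,1,1] : List Int))
      = List.replicate (N+1) ([1,1,1] : List Int) := by
    rw [List.map_const']
    congr 1
    rw [PySem.List.length_pyRange_one]
    omega
  show (PySem.List.pyGetD
      ((PySem.List.pyRange 2 ((N : Int)+1) 1).foldl
        (fun T i => (PySem.List.pyRange 0 3 1).foldl (fun T j => pvF T i j) T)
        ((PySem.List.pyRange 0 ((N : Int)+1) 1).map (fun _ => ([1,1,1] : List Int))))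
      (N : Int) []).sum = _
  rw [hinit]
  have h := table_lem N N le_rfl
  have hcast : ((N : Int) + 1) = ((N : Int) + 1) := rfl
  rw [h]
  simp [PySem.List.pyGetD_natCast]

theorem stringhe_spec_aux (N : Nat) :
    stringhe_ternarie (N : Int) = stringhe_ternarie_alt (N : Int) := by
  rw [a_val]
  by_cases h : N = 0
  · subst h; decide
  · rw [alt_val N (by omega)]
    obtain ⟨k, hk⟩ : ∃ k, N = k + 1 := ⟨N - 1, by omega⟩
    subst hk
    have hget : (((List.range (k+1+1)).map rowR').getD (k+1) []) = rowR k := by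
      simp [List.getD]
      rfl
    rw [hget]
    simp [rowR]
    ring

-- ===== VERDICT (by name: the statement is the Claim_ definition above) =====
theorem stringhe_ternarie_spec : Claim_equal_stringhe_ternarie := by
  intro n _ hpre
  unfold Spec_stringhe_ternarie
  have h0 : 0 ≤ n := hpre
  have hN : n = ((n.toNat : Nat) : Int) := by omega
  rw [hN]
  exact stringhe_spec_aux n.toNat
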